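-- pv_equiv track=rewrite | github.com/baronout/Codigos-Python | 1° Semestre/Prova 04/Questão 3.py | lista_mesmo_tamanho
-- ===== SOURCE A (Python) =====
-- def lista_mesmo_tamanho(list):
--     resultado = [] # Inicializa a lista que armazenará as sublistas
--     lista_atual = [] # Inicializa a lista atual que será adicionada à lista 'resultado'
--     tamanho_atual = 1 # Inicializa o comprimento da lista atual como 1
--     for num in list: # Loop por todos os elementos na lista 'list'
--         if num == -1: # Se o elemento for -1, saia do loop
--             break
--         lista_atual.append(num)  # Adicione o elemento atual à lista atual
--         if len(lista_atual) == tamanho_atual: # Se o comprimento da lista atual é igual ao comprimento desejado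
--             resultado.append(lista_atual) # Adicione a lista atual à lista 'resultado'
--             lista_atual = [] # Reinicie a lista atual
--             tamanho_atual += 1 # Aumente o comprimento desejado da lista atual
--     return resultado
-- ===== SOURCE B (Python) =====
-- def lista_mesmo_tamanho(list):
--     cut = list.index(-1) if -1 in list else len(list)
--     rest = list[:cut]
--     resultado = []
--     tamanho = 1
--     while len(rest) >= tamanho:
--         resultado.append(rest[:tamanho])
--         rest = rest[tamanho:]
--         tamanho += 1
--     return resultado
-- ===== Notes on version B (the rewrite author's own statement) =====
-- stated objective: alternative
-- what changed: B first truncates the list at the first -1 via index(), then builds the groups by whole-slice take/drop with a growing size instead of appending element by element with a running current-group buffer.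
import Mathlib
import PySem

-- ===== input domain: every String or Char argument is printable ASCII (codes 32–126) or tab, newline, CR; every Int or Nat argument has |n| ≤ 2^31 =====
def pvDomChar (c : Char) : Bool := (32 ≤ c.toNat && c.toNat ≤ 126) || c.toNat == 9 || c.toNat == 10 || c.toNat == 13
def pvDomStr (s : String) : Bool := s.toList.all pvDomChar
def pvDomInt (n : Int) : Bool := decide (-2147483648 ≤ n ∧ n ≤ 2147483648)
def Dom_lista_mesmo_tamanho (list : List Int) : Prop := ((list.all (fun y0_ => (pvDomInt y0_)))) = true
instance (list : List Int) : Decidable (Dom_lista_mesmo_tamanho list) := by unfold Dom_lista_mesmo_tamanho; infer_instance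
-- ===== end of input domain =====

-- B builds the same grouping by whole-slice take/drop after truncating at the first -1, instead of A's element-by-element accumulation; objective: alternative decomposition.

-- ===== PORT A =====
-- the for-loop of A: state (resultado, lista_atual, tamanho_atual); the `break` returns resultado
def pvAloop (l : List Int) (resultado : List (List Int)) (lista_atual : List Int)
    (tamanho_atual : Int) : List (List Int) :=
  match l with
  | [] => resultado
  | num :: rest =>
    if num = -1 then resultado
    else
      let lista_atual' := lista_atual ++ [num]
      if (lista_atual'.length : Int) = tamanho_atual then
        pvAloop rest (resultado ++ [lista_atual']) [] (tamanho_atual + 1)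
      else
        pvAloop rest resultado lista_atual' tamanho_atual

def lista_mesmo_tamanho (list : List Int) : List (List Int) :=
  pvAloop list [] [] 1

-- ===== PORT B =====
-- B's while-loop: `while len(rest) >= tamanho: append rest[:tamanho]; rest = rest[tamanho:]; tamanho += 1`
-- represented with k = tamanho - 1 : Nat
def pvBloop (rest : List Int) (k : Nat) : List (List Int) :=
  if _h : k + 1 ≤ rest.length then
    rest.take (k + 1) :: pvBloop (rest.drop (k + 1)) (k + 1)
  else []
termination_by rest.length
decreasing_by simp [List.length_drop]; omega

def lista_mesmo_tamanho_alt (list : List Int) : List (List Int) :=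
  -- cut = list.index(-1) if -1 in list else len(list); rest = list[:cut]; then the while-loop
  pvBloop (list.take (match PySem.List.index? list (-1) with
    | some i => i
    | none => list.length)) 0

-- ===== PRECONDITION & SPEC =====
def Spec_lista_mesmo_tamanho (list : List Int) (out : List (List Int)) : Prop := out = lista_mesmo_tamanho_alt list
instance (list : List Int) (out : List (List Int)) : Decidable (Spec_lista_mesmo_tamanho list out) := by unfold Spec_lista_mesmo_tamanho; infer_instance

-- ===== CLAIM (what is proved, stated in full; the proofs are below) =====
def Claim_equal_lista_mesmo_tamanho : Prop := ∀ (list : List Int), Dom_lista_mesmo_tamanho list → Spec_lista_mesmo_tamanho list (lista_mesmo_tamanho list)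

-- ===== LEMMAS AND PROOFS =====

-- the prefix B slices off is exactly takeWhile (· ≠ -1)
theorem pvCut_eq_takeWhile (l : List Int) :
    l.take (match PySem.List.index? l (-1) with
      | some i => i
      | none => l.length) = l.takeWhile (fun x => x ≠ -1) := by
  induction l with
  | nil => simp
  | cons x xs ih =>
    by_cases hx : x = -1
    · subst hx
      rw [PySem.List.index?_cons_self]
      simp only [List.take_zero, List.takeWhile_cons]
      rw [if_neg (by decide)]
    · rw [PySem.List.index?_cons_of_ne xs hx]
      cases h : PySem.List.index? xs (-1) with
      | none =>
        rw [h] at ih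
        simp only [Option.map_none] at ih ⊢
        rw [List.take_length] at ih ⊢
        rw [List.takeWhile_cons, if_pos (decide_eq_true hx), ← ih]
      | some i =>
        rw [h] at ih
        simp only [Option.map_some] at ih ⊢
        rw [List.take_succ_cons, List.takeWhile_cons, if_pos (decide_eq_true hx), ih]

-- A's loop ignores everything from the first -1 on
theorem pvAloop_takeWhile (l : List Int) (res : List (List Int)) (cur : List Int) (t : Int) :
    pvAloop l res cur t = pvAloop (l.takeWhile (fun x => x ≠ -1)) res cur t := by
  induction l generalizing res cur t with
  | nil => simp
  | cons x xs ih =>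
    by_cases hx : x = -1
    · subst hx; simp [pvAloop]
    · have htw : List.takeWhile (fun y => decide (y ≠ -1)) (x :: xs)
          = x :: List.takeWhile (fun y => decide (y ≠ -1)) xs := by
        simp [hx]
      simp only [htw, pvAloop, if_neg hx]
      split <;> apply ih

-- main invariant: on a -1-free tail, A's loop is res ++ B's chopping of cur ++ p
theorem pvAloop_eq_chop (p : List Int) (res : List (List Int)) (cur : List Int) (k : Nat)
    (hcur : cur.length ≤ k) (hp : ∀ x ∈ p, x ≠ -1) :
    pvAloop p res cur ((k : Int) + 1) = res ++ pvBloop (cur ++ p) k := by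
  induction p generalizing res cur k with
  | nil =>
    rw [pvBloop]
    simp [pvAloop]
    omega
  | cons n rest ih =>
    have hn : n ≠ -1 := hp n (by simp)
    simp only [pvAloop, hn, if_false]
    by_cases hlen : ((cur ++ [n]).length : Int) = (k : Int) + 1
    · have hck : cur.length = k := by simp at hlen; omega
      rw [if_pos hlen]
      rw [show ((k : Int) + 1 + 1) = (((k + 1 : Nat)) : Int) + 1 by push_cast; ring]
      rw [ih (res ++ [cur ++ [n]]) [] (k + 1) (by simp) (fun x hx => hp x (by simp [hx]))]
      conv_rhs => rw [pvBloop]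
      have hlen2 : k + 1 ≤ (cur ++ n :: rest).length := by simp; omega
      rw [dif_pos hlen2]
      have htake : (cur ++ n :: rest).take (k + 1) = cur ++ [n] := by
        have : cur ++ n :: rest = (cur ++ [n]) ++ rest := by simp
        rw [this, List.take_append_of_le_length (by simp [hck])]
        simp [hck]
      have hdrop : (cur ++ n :: rest).drop (k + 1) = rest := by
        have : cur ++ n :: rest = (cur ++ [n]) ++ rest := by simp
        rw [this, List.drop_append_of_le_length (by simp [hck])]
        simp [hck]
      rw [htake, hdrop]
      simp
    · have hck : cur.length < k := by simp at hlen ⊢; omega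
      rw [if_neg hlen]
      rw [ih res (cur ++ [n]) k (by simp; omega) (fun x hx => hp x (by simp [hx]))]
      simp

-- ===== VERDICT (by name: the statement is the Claim_ definition above) =====
theorem lista_mesmo_tamanho_spec : Claim_equal_lista_mesmo_tamanho := by
  intro list _
  unfold Spec_lista_mesmo_tamanho lista_mesmo_tamanho lista_mesmo_tamanho_alt
  rw [pvCut_eq_takeWhile, pvAloop_takeWhile]
  have h0 : (1 : Int) = ((0 : Nat) : Int) + 1 := by norm_num
  rw [h0, pvAloop_eq_chop _ _ _ 0 (by simp)
    (fun x hx => by simpa using (List.mem_takeWhile_imp hx))]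
  simp
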